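-- pv_equiv track=rewrite | github.com/russellteter/sc-election-map-2026 | scripts/process-data.py | find_party
-- ===== SOURCE A (Python) =====
-- def normalize_name(name: str) -> str:
--     """Normalize candidate name for matching."""
--     # Handle "Last, First" format
--     if "," in name:
--         parts = name.split(",", 1)
--         name = f"{parts[1].strip()} {parts[0].strip()}"
--     return name.strip()
--
-- def find_party(name: str, party_data: dict) -> str | None:
--     """Look up party affiliation for a candidate."""
--     candidates = party_data.get("candidates", {})
--
--     # Try exact match first
--     if name in candidates:
--         return candidates[name].get("party")
--
--     # Try normalized name
--     normalized = normalize_name(name)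
--     for stored_name, info in candidates.items():
--         if normalize_name(stored_name) == normalized:
--             return info.get("party")
--
--     # Try partial matching (last name)
--     name_parts = normalized.lower().split()
--     for stored_name, info in candidates.items():
--         stored_parts = normalize_name(stored_name).lower().split()
--         # Match if last names are the same
--         if name_parts and stored_parts and name_parts[-1] == stored_parts[-1]:
--             return info.get("party")
--
--     return None
-- ===== SOURCE B (Python) =====
-- def normalize_name(name: str) -> str:
--     """Normalize candidate name for matching."""
--     if "," in name:
--         parts = name.split(",", 1)
--         name = f"{parts[1].strip()} {parts[0].strip()}"
--     return name.strip()
--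
-- def find_party(name: str, party_data: dict) -> str | None:
--     """Look up party affiliation for a candidate (single-pass fallback scan)."""
--     candidates = party_data.get("candidates", {})
--     if name in candidates:
--         return candidates[name].get("party")
--     normalized = normalize_name(name)
--     parts = normalized.lower().split()
--     target = parts[-1] if parts else None
--     norm_hit = None
--     last_hit = None
--     for stored_name, info in candidates.items():
--         stored_norm = normalize_name(stored_name)
--         if norm_hit is None and stored_norm == normalized:
--             norm_hit = info
--         if last_hit is None and target is not None:
--             stored_parts = stored_norm.lower().split()
--             if stored_parts and stored_parts[-1] == target:
--                 last_hit = info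
--     hit = norm_hit if norm_hit is not None else last_hit
--     return hit.get("party") if hit is not None else None
-- ===== Notes on version B (the rewrite author's own statement) =====
-- stated objective: alternative
-- what changed: The two sequential fallback scans with early return are replaced by a single loop over the candidates that records the first normalized-name match and the first last-name match, deciding the priority (normalized beats last-name) only after the loop; each stored name is normalized once instead of once per scan.
import Mathlib
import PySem

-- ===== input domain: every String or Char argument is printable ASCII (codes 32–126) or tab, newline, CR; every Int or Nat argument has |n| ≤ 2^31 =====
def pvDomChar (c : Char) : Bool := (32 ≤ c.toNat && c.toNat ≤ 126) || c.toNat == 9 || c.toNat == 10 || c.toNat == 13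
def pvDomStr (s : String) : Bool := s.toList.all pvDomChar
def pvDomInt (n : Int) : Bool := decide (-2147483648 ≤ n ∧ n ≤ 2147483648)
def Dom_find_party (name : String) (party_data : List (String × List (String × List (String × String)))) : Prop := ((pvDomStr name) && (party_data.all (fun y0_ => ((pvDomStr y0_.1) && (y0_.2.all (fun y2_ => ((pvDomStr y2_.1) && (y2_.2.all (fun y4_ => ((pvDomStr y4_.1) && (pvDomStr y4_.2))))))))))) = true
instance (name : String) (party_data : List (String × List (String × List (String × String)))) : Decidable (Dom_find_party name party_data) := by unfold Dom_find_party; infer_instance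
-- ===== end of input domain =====

-- B replaces A's two sequential fallback scans by ONE pass recording the first
-- normalized-name hit and the first last-name hit, deciding priority afterwards (objective: alternative).

-- ===== PORT A =====
-- shared helper (identical in Source A and Source B)
def normalize_name (name : String) : String :=
  if PySem.Str.isIn "," name then
    let parts := (PySem.Str.splitMax? name "," 1).getD []
    PySem.Str.strip (PySem.Str.strip (parts.getD 1 "") ++ " " ++ PySem.Str.strip (parts.getD 0 ""))
  else
    PySem.Str.strip name

-- A's second loop: first info whose normalized stored name equals `normalized`
def findNormLoop (normalized : String) :
    List (String × List (String × String)) → Option (List (String × String))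
  | [] => none
  | (sn, info) :: t =>
      if normalize_name sn == normalized then some info else findNormLoop normalized t

-- A's third loop: first info whose normalized lowercased last word equals name_parts' last word
def findLastLoop (name_parts : List String) :
    List (String × List (String × String)) → Option (List (String × String))
  | [] => none
  | (sn, info) :: t =>
      let stored_parts := PySem.Str.split₀ (PySem.Str.lower (normalize_name sn))
      let hit := match name_parts.getLast?, stored_parts.getLast? with
        | some a, some b => a == b
        | _, _ => false
      if hit then some info else findLastLoop name_parts t

def find_party (name : String) (party_data : List (String × List (String × List (String × String)))) : Option String :=
  let candidates := PySem.Dict.mk ((PySem.Dict.mk party_data).getD "candidates" [])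
  if candidates.contains name then
    (PySem.Dict.mk ((candidates.get? name).getD [])).get? "party"
  else
    let normalized := normalize_name name
    match findNormLoop normalized candidates.items with
    | some info => (PySem.Dict.mk info).get? "party"
    | none =>
      let name_parts := PySem.Str.split₀ (PySem.Str.lower normalized)
      match findLastLoop name_parts candidates.items with
      | some info => (PySem.Dict.mk info).get? "party"
      | none => none

-- ===== PORT B =====
-- one pass: carry (norm_hit, last_hit), each set at its first match only
def scanHits (normalized : String) (target : Option String) :
    List (String × List (String × String)) →
    Option (List (String × String)) → Option (List (String × String)) →
    Option (List (String × String)) × Option (List (String × String))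
  | [], nh, lh => (nh, lh)
  | (sn, info) :: t, nh, lh =>
      let stored_norm := normalize_name sn
      let nh' := if nh.isNone && (stored_norm == normalized) then some info else nh
      let lh' :=
        if lh.isNone then
          match target with
          | some tg =>
            let stored_parts := PySem.Str.split₀ (PySem.Str.lower stored_norm)
            match stored_parts.getLast? with
            | some b => if b == tg then some info else lh
            | none => lh
          | none => lh
        else lh
      scanHits normalized target t nh' lh'

def find_party_alt (name : String) (party_data : List (String × List (String × List (String × String)))) : Option String :=
  let candidates := PySem.Dict.mk ((PySem.Dict.mk party_data).getD "candidates" [])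
  if candidates.contains name then
    (PySem.Dict.mk ((candidates.get? name).getD [])).get? "party"
  else
    let normalized := normalize_name name
    let parts := PySem.Str.split₀ (PySem.Str.lower normalized)
    let target := parts.getLast?
    let (nh, lh) := scanHits normalized target candidates.items none none
    match nh.or lh with
    | some info => (PySem.Dict.mk info).get? "party"
    | none => none

-- ===== PRECONDITION & SPEC =====
-- A is total. Pre_ excludes only association lists with duplicate keys (at the top level, in the
-- "candidates" table, or inside an info record): such lists are not the encoding of any Python dict,
-- so A's first-match behaviour on them is an artefact of the list encoding, not of A.
def Pre_find_party (name : String) (party_data : List (String × List (String × List (String × String)))) : Prop :=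
  (party_data.map Prod.fst).Nodup ∧
  ((((PySem.Dict.mk party_data).getD "candidates" []).map Prod.fst).Nodup) ∧
  ∀ p ∈ (PySem.Dict.mk party_data).getD "candidates" [], (p.2.map Prod.fst).Nodup
instance (name : String) (party_data : List (String × List (String × List (String × String)))) : Decidable (Pre_find_party name party_data) := by unfold Pre_find_party; infer_instance
def pvWitness_find_party : String × (List (String × List (String × List (String × String)))) := ("Jane Doe", [("candidates", [("Doe, Jane", [("party", "D")])])])

def Spec_find_party (name : String) (party_data : List (String × List (String × List (String × String)))) (out : Option String) : Prop := out = find_party_alt name party_data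
instance (name : String) (party_data : List (String × List (String × List (String × String)))) (out : Option String) : Decidable (Spec_find_party name party_data out) := by unfold Spec_find_party; infer_instance

-- ===== CLAIM (what is proved, stated in full; the proofs are below) =====
def Claim_equal_find_party : Prop := ∀ (name : String) (party_data : List (String × List (String × List (String × String)))), Dom_find_party name party_data → Pre_find_party name party_data → Spec_find_party name party_data (find_party name party_data)

-- ===== LEMMAS AND PROOFS =====

-- B's per-element last-name test, written as a first-match search like A's loops
def findLastT (target : Option String) :
    List (String × List (String × String)) → Option (List (String × String))
  | [] => none
  | (sn, info) :: t =>
      let stored_parts := PySem.Str.split₀ (PySem.Str.lower (normalize_name sn))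
      let hit := match target, stored_parts.getLast? with
        | some tg, some b => b == tg
        | _, _ => false
      if hit then some info else findLastT target t

theorem fn_cons (n sn : String) (info : List (String × String)) (t : List (String × List (String × String))) :
    findNormLoop n ((sn, info) :: t) = if normalize_name sn == n then some info else findNormLoop n t := rfl

theorem flt_cons (target : Option String) (sn : String) (info : List (String × String)) (t : List (String × List (String × String))) :
    findLastT target ((sn, info) :: t) =
      if (match target, (PySem.Str.split₀ (PySem.Str.lower (normalize_name sn))).getLast? with
          | some tg, some b => b == tg
          | _, _ => false) then some info else findLastT target t := rfl

theorem fll_cons (name_parts : List String) (sn : String) (info : List (String × String)) (t : List (String × List (String × String))) :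
    findLastLoop name_parts ((sn, info) :: t) =
      if (match name_parts.getLast?, (PySem.Str.split₀ (PySem.Str.lower (normalize_name sn))).getLast? with
          | some a, some b => a == b
          | _, _ => false) then some info else findLastLoop name_parts t := rfl

theorem scanHits_eq (normalized : String) (target : Option String)
    (l : List (String × List (String × String)))
    (nh lh : Option (List (String × String))) :
    scanHits normalized target l nh lh =
      (nh.or (findNormLoop normalized l), lh.or (findLastT target l)) := by
  induction l generalizing nh lh with
  | nil => cases nh <;> cases lh <;> rfl
  | cons p t ih =>
    obtain ⟨sn, info⟩ := p
    rw [scanHits.eq_def]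
    simp only []
    rw [ih, fn_cons, flt_cons]
    generalize (normalize_name sn == normalized) = c1
    generalize (PySem.Str.split₀ (PySem.Str.lower (normalize_name sn))).getLast? = b?
    cases nh <;> cases lh <;> cases target <;> cases c1 <;>
      rcases b? with _ | b <;> split_ifs <;> simp_all [Option.or]

theorem findLastT_eq (name_parts : List String)
    (l : List (String × List (String × String))) :
    findLastT name_parts.getLast? l = findLastLoop name_parts l := by
  induction l with
  | nil => rfl
  | cons p t ih =>
    obtain ⟨sn, info⟩ := p
    rw [flt_cons, fll_cons, ih]
    generalize (PySem.Str.split₀ (PySem.Str.lower (normalize_name sn))).getLast? = b?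
    rcases name_parts.getLast? with _ | a <;> rcases b? with _ | b
    · rfl
    · rfl
    · rfl
    · rw [show (match some a, some b with
              | some tg, some b => b == tg
              | _, _ => false) = (b == a) from rfl,
          show (match some a, some b with
              | some a, some b => a == b
              | _, _ => false) = (a == b) from rfl,
          show (b == a) = (a == b) from BEq.comm]

-- ===== VERDICT (by name: the statement is the Claim_ definition above) =====
theorem find_party_spec : Claim_equal_find_party := by
  intro name party_data _ _
  unfold Spec_find_party find_party find_party_alt
  set candidates := PySem.Dict.mk ((PySem.Dict.mk party_data).getD "candidates" []) with hc
  by_cases h : candidates.contains name = true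
  · simp [h]
  · simp only [Bool.not_eq_true] at h
    simp only [h, if_false, Bool.false_eq_true]
    rw [scanHits_eq, findLastT_eq]
    rcases findNormLoop (normalize_name name) candidates.items with _ | info <;>
      simp [Option.or]
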